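-- pv_equiv track=rewrite | github.com/jmsung/playground | euler/scripts/myfunc.py | greatest_product
-- ===== SOURCE A (Python) =====
-- def element_product(x):
--     """ Return the product of all the element in list x
--
--     Parameters
--     ----------
--     x (list): list of int numbers
--
--     Return
--     ------
--     product (float): the greatest product of size n """
--
--     if not x:
--         return None
--
--     if 0 in x:
--         return 0
--
--     product = 1
--     for element in x:
--         product *= element
--     return product
--
-- def greatest_product(x, n):
--     """ Return the greatest product of n consecutive numbers in list x
--
--     Parameters
--     ----------
--     x (list): list of numbers
--     n (int): size of consecurtive number
--
--     Return
--     ------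
--     greatest (float): the greatest product of size n """
--
--     if len(x) < n:
--         return None
--
--     # the first product
--     greatest = element_product(x[:n])
--
--     # replace if greater
--     for i in range(len(x) - n + 1):
--         new = element_product(x[i:i + n])
--         if new > greatest:
--             greatest = new
--
--     return greatest
-- ===== SOURCE B (Python) =====
-- def greatest_product(x, n):
--     """Sliding window: keep the product of the window's nonzero elements and
--     its zero count; each step multiplies in the new element and divides out
--     the departing one, so the whole scan is one pass."""
--     if len(x) < n:
--         return None
--     prod = 1       # product of the nonzero elements currently in the window
--     zeros = 0      # number of zeros currently in the window
--     best = None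
--     for i in range(len(x)):
--         v = x[i]
--         if v == 0:
--             zeros += 1
--         else:
--             prod *= v
--         if i >= n:
--             u = x[i - n]
--             if u == 0:
--                 zeros -= 1
--             else:
--                 prod //= u
--         if i >= n - 1:
--             cur = 0 if zeros > 0 else prod
--             if best is None or cur > best:
--                 best = cur
--     return best
-- ===== Notes on version B (the rewrite author's own statement) =====
-- stated objective: faster
-- what changed: Replaces A's recomputation of each window's product from scratch with a single sliding-window pass that maintains the running product of nonzero window elements and a zero count, multiplying in the entering element and dividing out the leaving one.
-- outside the precondition, e.g. on greatest_product([1, 2], 0): A raises TypeError, B returns 1; on greatest_product([1, 2], -1): A raises TypeError, B raises IndexError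
import Mathlib
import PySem

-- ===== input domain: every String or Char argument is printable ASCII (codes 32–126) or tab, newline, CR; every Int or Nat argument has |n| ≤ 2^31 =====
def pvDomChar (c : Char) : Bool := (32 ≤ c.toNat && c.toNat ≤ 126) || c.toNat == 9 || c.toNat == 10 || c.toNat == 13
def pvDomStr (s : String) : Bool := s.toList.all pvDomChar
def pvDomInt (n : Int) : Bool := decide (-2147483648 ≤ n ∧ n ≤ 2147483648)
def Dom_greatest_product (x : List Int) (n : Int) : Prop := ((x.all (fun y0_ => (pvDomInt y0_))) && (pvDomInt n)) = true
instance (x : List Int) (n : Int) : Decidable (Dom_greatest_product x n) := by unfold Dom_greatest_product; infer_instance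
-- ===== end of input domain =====

-- B replaces A's per-window product recomputation by a one-pass sliding window
-- (running product of the window's nonzero elements plus a zero count); objective: faster (asymptotic).

-- ===== PORT A =====
def elementProduct (xs : List Int) : Option Int :=
  if xs = [] then none
  else if 0 ∈ xs then some 0
  else some (xs.foldl (fun p e => p * e) 1)

-- loop body of A's 'for i in range(...)'; Python's 'new > greatest' raises TypeError when a
-- None is involved (only reachable for n ≤ 0, excluded by Pre_): those cases fall to the catch-all.
def aStep (x : List Int) (n : Int) (g : Option Int) (i : Int) : Option Int :=
  match elementProduct (PySem.List.slice x (some i) (some (i + n))), g with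
  | some a, some b => if b < a then some a else g
  | _, _ => g

def greatest_product (x : List Int) (n : Int) : Option Int :=
  if (x.length : Int) < n then none
  else
    (PySem.List.pyRange 0 ((x.length : Int) - n + 1) 1).foldl (aStep x n)
      (elementProduct (PySem.List.slice x none (some n)))

-- ===== PORT B =====
-- 'best is None or cur > best' from B's loop body
def noneOrGt (b : Option Int) (cur : Int) : Bool :=
  match b with
  | none => true
  | some bv => bv < cur

-- loop body of B's 'for i in range(len(x))'; the pyGetD defaults are never used under Pre_
-- (both indices are in range there, exactly as in the Python).
def bStep (x : List Int) (n : Int) (s : Int × Int × Option Int) (i : Int) : Int × Int × Option Int :=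
  let v := PySem.List.pyGetD x i 0
  let prod := if v = 0 then s.1 else s.1 * v
  let zeros := if v = 0 then s.2.1 + 1 else s.2.1
  let pz :=
    if n ≤ i then
      let u := PySem.List.pyGetD x (i - n) 0
      if u = 0 then (prod, zeros - 1) else (PySem.Int.floordiv prod u, zeros)
    else (prod, zeros)
  let best :=
    if n - 1 ≤ i then
      let cur := if 0 < pz.2 then 0 else pz.1
      if noneOrGt s.2.2 cur then some cur else s.2.2
    else s.2.2
  (pz.1, pz.2, best)

def greatest_product_alt (x : List Int) (n : Int) : Option Int :=
  if (x.length : Int) < n then none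
  else ((PySem.List.pyRange 0 (x.length : Int) 1).foldl (bStep x n) (1, 0, none)).2.2

-- ===== PRECONDITION & SPEC =====
-- Pre_ excludes n ≤ 0, on which A raises TypeError ('>' between None and None/int).
def Pre_greatest_product (x : List Int) (n : Int) : Prop := 1 ≤ n
instance (x : List Int) (n : Int) : Decidable (Pre_greatest_product x n) := by unfold Pre_greatest_product; infer_instance
def pvWitness_greatest_product : List Int × Int := ([2, -3, 4], 2)

def Spec_greatest_product (x : List Int) (n : Int) (out : Option Int) : Prop := out = greatest_product_alt x n
instance (x : List Int) (n : Int) (out : Option Int) : Decidable (Spec_greatest_product x n out) := by unfold Spec_greatest_product; infer_instance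

-- ===== CLAIM (what is proved, stated in full; the proofs are below) =====
def Claim_equal_greatest_product : Prop := ∀ (x : List Int) (n : Int), Dom_greatest_product x n → Pre_greatest_product x n → Spec_greatest_product x n (greatest_product x n)

-- ===== LEMMAS AND PROOFS =====

-- window starting at j (A's view) and its Python value
def win (x : List Int) (m j : Nat) : List Int := (x.drop j).take m
def wp (x : List Int) (m j : Nat) : Int := if 0 ∈ win x m j then 0 else (win x m j).prod
-- B's state components over the truncated window of the first k elements
def nzp (l : List Int) : Int := (l.filter (fun a => a ≠ 0)).prod
def zc (l : List Int) : Int := (l.count 0 : Int)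
def wtk (x : List Int) (m k : Nat) : List Int := (x.take k).drop (k - m)
def bestSpec (x : List Int) (m k : Nat) : Option Int :=
  if k < m then none
  else some (((List.range (k - m)).map (fun j => wp x m (j + 1))).foldl max (wp x m 0))

lemma elementProduct_eq (l : List Int) (h : l ≠ []) :
    elementProduct l = some (if 0 ∈ l then 0 else l.prod) := by
  unfold elementProduct
  rw [if_neg h, List.prod_eq_foldl]
  split <;> simp_all

lemma floordiv_mul_cancel (u q : Int) (hu : u ≠ 0) : PySem.Int.floordiv (u * q) u = q := by
  have h1 := PySem.Int.floordiv_mul_add_mod (u * q) u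
  have h2 : PySem.Int.mod (u * q) u = 0 := by
    rw [PySem.Int.mod_eq_zero_iff_dvd]
    exact dvd_mul_right u q
  have h3 : PySem.Int.floordiv (u * q) u * u = u * q := by omega
  exact mul_right_cancel₀ hu (h3.trans (mul_comm u q))

lemma nzp_append (l : List Int) (v : Int) :
    nzp (l ++ [v]) = if v = 0 then nzp l else nzp l * v := by
  simp [nzp, List.filter_append]
  split <;> simp_all

lemma zc_append (l : List Int) (v : Int) :
    zc (l ++ [v]) = if v = 0 then zc l + 1 else zc l := by
  simp [zc, List.count_append]
  split <;> simp_all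

lemma nzp_cons (u : Int) (t : List Int) :
    nzp (u :: t) = if u = 0 then nzp t else u * nzp t := by
  simp [nzp, List.filter_cons]
  split <;> simp_all

lemma zc_cons (u : Int) (t : List Int) :
    zc (u :: t) = if u = 0 then zc t + 1 else zc t := by
  simp [zc, List.count_cons]
  split <;> simp_all

lemma cur_eq_wp (x : List Int) (m k : Nat) (hm : 1 ≤ m) (hmk : m ≤ k) :
    (if 0 < zc (wtk x m k) then 0 else nzp (wtk x m k)) = wp x m (k - m) := by
  have hw : wtk x m k = win x m (k - m) := by
    unfold wtk win
    rw [List.drop_take]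
    congr 1
    omega
  rw [hw, wp]
  by_cases h0 : (0:Int) ∈ win x m (k - m)
  · have : 0 < zc (win x m (k - m)) := by
      simpa [zc, List.count_pos_iff] using h0
    simp [this, h0]
  · have hz : zc (win x m (k - m)) = 0 := by
      simp [zc, List.count_eq_zero]
      exact h0
    have hnz : nzp (win x m (k - m)) = (win x m (k - m)).prod := by
      rw [nzp, List.filter_eq_self.2]
      intro a ha
      simp
      rintro rfl; exact h0 ha
    simp [hz, h0, hnz]

lemma if_noneOrGt_some (b c : Int) :
    (if noneOrGt (some b) c then some c else some b) = some (max b c) := by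
  by_cases h : b < c
  · simp [noneOrGt, h, max_eq_right h.le]
  · simp [noneOrGt, h, max_eq_left (not_lt.1 h)]

lemma bestSpec_succ_of_le (x : List Int) (m k : Nat) (hmk : m ≤ k) :
    bestSpec x m (k + 1)
      = some (max (((List.range (k - m)).map (fun j => wp x m (j + 1))).foldl max (wp x m 0))
          (wp x m (k - m + 1))) := by
  unfold bestSpec
  rw [if_neg (by omega), show k + 1 - m = (k - m) + 1 by omega,
    List.range_succ, List.map_append, List.foldl_append]
  simp

lemma invB (x : List Int) (m : Nat) (hm : 1 ≤ m) (k : Nat) (hk : k ≤ x.length) :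
    (List.map (fun (j : Nat) => (j : Int)) (List.range k)).foldl (bStep x (m : Int)) (1, 0, none)
      = (nzp (wtk x m k), zc (wtk x m k), bestSpec x m k) := by
  induction k with
  | zero =>
    simp [wtk, nzp, zc, bestSpec]
    omega
  | succ k ih =>
    have hkL : k < x.length := hk
    rw [List.range_succ, List.map_append, List.foldl_append, ih (Nat.le_of_succ_le hk)]
    simp only [List.map_cons, List.map_nil, List.foldl_cons, List.foldl_nil]
    have hgd : x.getD k 0 = x[k] := List.getD_eq_getElem x 0 hkL
    -- the window after absorbing x[k], before dropping the departing element
    have hw1 : wtk x m k ++ [x[k]] = (x.take (k + 1)).drop (k - m) := by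
      rw [List.take_add_one, List.getElem?_eq_getElem hkL,
        List.drop_append_of_le_length (by simp; omega)]
      rfl
    simp only [bStep, PySem.List.pyGetD_natCast, hgd]
    rw [← nzp_append (wtk x m k) x[k], ← zc_append (wtk x m k) x[k], hw1]
    by_cases hmk : m ≤ k
    · -- the window is full: drop x[k-m]
      have hcast : ((k : Int) - (m : Int)) = ((k - m : Nat) : Int) := by omega
      have hkm : k - m < x.length := by omega
      rw [if_pos (by exact_mod_cast Nat.cast_le.2 hmk), hcast, PySem.List.pyGetD_natCast,
        List.getD_eq_getElem x 0 hkm]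
      have hcons : (x.take (k + 1)).drop (k - m) = x[k - m] :: wtk x m (k + 1) := by
        rw [List.drop_eq_getElem_cons (by simp; omega), List.getElem_take]
        unfold wtk
        rw [show k - m + 1 = k + 1 - m by omega]
      rw [hcons, nzp_cons, zc_cons]
      have hcur : ∀ pz : Int × Int, pz = (nzp (wtk x m (k + 1)), zc (wtk x m (k + 1))) →
          (if 0 < pz.2 then 0 else pz.1) = wp x m (k + 1 - m) := by
        rintro _ rfl
        exact cur_eq_wp x m (k + 1) hm (by omega)
      by_cases hu : x[k - m] = 0
      · rw [if_pos hu]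
        simp only [if_pos hu]
        rw [if_pos (by omega : (m : Int) - 1 ≤ (k : Int)), Int.add_sub_cancel]
        rw [show (if 0 < zc (wtk x m (k + 1)) then (0:Int) else nzp (wtk x m (k + 1)))
              = wp x m (k - m + 1) from by
            rw [show k - m + 1 = k + 1 - m by omega]
            exact cur_eq_wp x m (k + 1) hm (by omega)]
        rw [show bestSpec x m k
              = some (((List.range (k - m)).map (fun j => wp x m (j + 1))).foldl max (wp x m 0)) from by
            unfold bestSpec
            rw [if_neg (by omega)]]
        rw [if_noneOrGt_some, bestSpec_succ_of_le x m k hmk]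
      · rw [if_neg hu]
        simp only [if_neg hu]
        rw [floordiv_mul_cancel _ _ hu]
        rw [if_pos (by omega : (m : Int) - 1 ≤ (k : Int))]
        rw [show (if 0 < zc (wtk x m (k + 1)) then (0:Int) else nzp (wtk x m (k + 1)))
              = wp x m (k - m + 1) from by
            rw [show k - m + 1 = k + 1 - m by omega]
            exact cur_eq_wp x m (k + 1) hm (by omega)]
        rw [show bestSpec x m k
              = some (((List.range (k - m)).map (fun j => wp x m (j + 1))).foldl max (wp x m 0)) from by
            unfold bestSpec
            rw [if_neg (by omega)]]
        rw [if_noneOrGt_some, bestSpec_succ_of_le x m k hmk]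
    · -- the window is still growing: nothing departs
      have hwtk : (x.take (k + 1)).drop (k - m) = wtk x m (k + 1) := by
        unfold wtk
        rw [show k - m = 0 by omega, show k + 1 - m = 0 by omega]
      rw [if_neg (by exact_mod_cast fun h => hmk (Nat.cast_le.1 h) : ¬ (m : Int) ≤ (k : Int)), hwtk]
      by_cases hm1 : m = k + 1
      · rw [if_pos (by omega : (m : Int) - 1 ≤ (k : Int))]
        rw [show bestSpec x m k = none from by unfold bestSpec; rw [if_pos (by omega)]]
        rw [show (if 0 < zc (wtk x m (k + 1)) then (0:Int) else nzp (wtk x m (k + 1)))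
              = wp x m 0 from by
            rw [show (0 : Nat) = k + 1 - m by omega]
            exact cur_eq_wp x m (k + 1) hm (by omega)]
        rw [show bestSpec x m (k + 1) = some (wp x m 0) from by
            unfold bestSpec
            rw [if_neg (by omega), show k + 1 - m = 0 by omega]
            simp]
        rfl
      · rw [if_neg (by omega : ¬ ((m : Int) - 1 ≤ (k : Int))),
          show bestSpec x m k = none from by unfold bestSpec; rw [if_pos (by omega)],
          show bestSpec x m (k + 1) = none from by unfold bestSpec; rw [if_pos (by omega)]]

lemma invA (x : List Int) (m : Nat) (hm : 1 ≤ m) (ks : List Nat)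
    (hks : ∀ j ∈ ks, j + m ≤ x.length) (g : Int) :
    (List.map (fun (j : Nat) => (j : Int)) ks).foldl (aStep x (m : Int)) (some g)
      = some (ks.foldl (fun g j => max g (wp x m j)) g) := by
  induction ks generalizing g with
  | nil => simp
  | cons j ks ih =>
    have hj : j + m ≤ x.length := hks j (List.mem_cons_self)
    have hne : win x m j ≠ [] := by
      unfold win
      intro hcontra
      have := congrArg List.length hcontra
      simp at this
      omega
    simp only [List.map_cons, List.foldl_cons]
    have hstep : aStep x (m : Int) (some g) (j : Int) = some (max g (wp x m j)) := by
      unfold aStep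
      rw [PySem.List.slice_natCast_add,
        show List.take m (List.drop j x) = win x m j from rfl,
        elementProduct_eq _ hne,
        show (if (0:Int) ∈ win x m j then 0 else (win x m j).prod) = wp x m j from rfl]
      simp only []
      split_ifs with h
      · rw [max_eq_right h.le]
      · rw [max_eq_left (not_lt.1 h)]
    rw [hstep]
    exact ih (fun j hj' => hks j (List.mem_cons_of_mem _ hj')) _

-- ===== VERDICT (by name: the statement is the Claim_ definition above) =====
theorem greatest_product_spec : Claim_equal_greatest_product := by
  intro x n _ hpre
  unfold Spec_greatest_product greatest_product greatest_product_alt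
  by_cases hlen : (x.length : Int) < n
  · rw [if_pos hlen, if_pos hlen]
  · rw [if_neg hlen, if_neg hlen]
    have hn0 : 0 ≤ n := le_trans (by norm_num) hpre
    obtain ⟨m, rfl⟩ : ∃ m : Nat, n = (m : Int) := ⟨n.toNat, (Int.toNat_of_nonneg hn0).symm⟩
    have hpre' : (1 : Int) ≤ (m : Int) := hpre
    have hm : 1 ≤ m := by exact_mod_cast hpre'
    have hmL : m ≤ x.length := by exact_mod_cast not_lt.1 hlen
    -- B's side: the sliding-window invariant at the end of the scan
    rw [PySem.List.pyRange_zero_nat x.length, invB x m hm x.length le_rfl]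
    rw [show bestSpec x m x.length
          = some (((List.range (x.length - m)).map (fun j => wp x m (j + 1))).foldl max (wp x m 0))
        from by unfold bestSpec; rw [if_neg (by omega)]]
    -- A's side: the fold of window maxima
    rw [show (x.length : Int) - (m : Int) + 1 = ((x.length - m + 1 : Nat) : Int) by omega,
      PySem.List.pyRange_zero_nat, PySem.List.slice_to_natCast]
    have hne : x.take m ≠ [] := by
      have hlt : (x.take m).length = m := by
        rw [List.length_take]
        omega
      intro h
      rw [h] at hlt
      simp at hlt
      omega
    rw [elementProduct_eq _ hne,
      show (if (0 : Int) ∈ x.take m then 0 else (x.take m).prod) = wp x m 0 from by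
        unfold wp win; rw [List.drop_zero],
      invA x m hm (List.range (x.length - m + 1)) (fun j hj => by simp at hj; omega) (wp x m 0)]
    -- both sides are the same maximum
    congr 1
    rw [List.range_succ_eq_map]
    simp only [List.foldl_cons, List.foldl_map, max_self]
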